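-- pv_equiv track=rewrite | github.com/AnastasiyaW/knowledge-space | hooks/levels.py | _make_badge
-- ===== SOURCE A (Python) =====
-- LEVEL_NAMES = {
--     1: "Intro",
--     2: "Basic",
--     3: "Intermediate",
--     4: "Advanced",
--     5: "Expert",
-- }
--
-- def _make_badge(level: int) -> str:
--     """Generate HTML for level stars badge."""
--     level = max(1, min(5, level))
--     stars = []
--     for i in range(1, 6):
--         if i <= level:
--             stars.append('<span class="ks-level__star--filled">&#9733;</span>')
--         else:
--             stars.append('<span class="ks-level__star--empty">&#9733;</span>')
--     stars_html = "".join(stars)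
--     name = LEVEL_NAMES.get(level, "")
--     return (
--         f'\n<div class="ks-level-badge" markdown="0">'
--         f'<span class="ks-level">{stars_html}</span>'
--         f' {name}'
--         f'</div>\n'
--     )
-- ===== SOURCE B (Python) =====
-- LEVEL_NAMES = {
--     1: "Intro",
--     2: "Basic",
--     3: "Intermediate",
--     4: "Advanced",
--     5: "Expert",
-- }
--
-- FILLED = '<span class="ks-level__star--filled">&#9733;</span>'
-- EMPTY = '<span class="ks-level__star--empty">&#9733;</span>'
--
-- # A fixed 10-element strip: 5 filled stars followed by 5 empty stars.
-- # Any badge row of n filled + (5-n) empty stars is the 5-wide window of the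
-- # strip starting at offset 5-n, so no per-star loop or branch is needed.
-- STRIP = [FILLED] * 5 + [EMPTY] * 5
--
--
-- def _make_badge(level: int) -> str:
--     """Generate HTML for level stars badge."""
--     level = max(1, min(5, level))
--     stars_html = "".join(STRIP[5 - level:10 - level])
--     name = LEVEL_NAMES[level]
--     return (
--         f'\n<div class="ks-level-badge" markdown="0">'
--         f'<span class="ks-level">{stars_html}</span>'
--         f' {name}'
--         f'</div>\n'
--     )
-- ===== Notes on version B (the rewrite author's own statement) =====
-- stated objective: alternative
-- what changed: Replaces the per-position loop with a branch by a sliding-window slice of a fixed precomputed ten-star strip (5 filled then 5 empty): the badge row is the five-wide window starting at offset five minus level, joined; the name is a direct dict index since the clamp guarantees the key.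
import Mathlib
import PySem

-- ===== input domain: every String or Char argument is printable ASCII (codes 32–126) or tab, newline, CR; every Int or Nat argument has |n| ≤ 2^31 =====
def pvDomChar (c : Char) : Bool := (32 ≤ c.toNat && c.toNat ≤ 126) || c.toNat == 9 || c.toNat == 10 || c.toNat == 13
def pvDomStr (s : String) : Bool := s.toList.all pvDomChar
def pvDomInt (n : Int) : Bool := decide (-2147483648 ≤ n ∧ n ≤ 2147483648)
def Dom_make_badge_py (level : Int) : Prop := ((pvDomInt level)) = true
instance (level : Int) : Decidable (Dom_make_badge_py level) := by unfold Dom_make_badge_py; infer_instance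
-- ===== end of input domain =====

-- B builds the star row as a sliding-window slice of a fixed 10-star strip instead of A's per-position loop with a branch (return value only).

-- ===== PORT A =====
def levelNamesA : PySem.Dict Int String :=
  PySem.Dict.ofList [(1, "Intro"), (2, "Basic"), (3, "Intermediate"), (4, "Advanced"), (5, "Expert")]

def make_badge_py (level : Int) : String :=
  let lvl := max 1 (min 5 level)
  let stars : List String :=
    (PySem.List.pyRange 1 6 1).foldl (fun acc i =>
      if i ≤ lvl then acc ++ ["<span class=\"ks-level__star--filled\">&#9733;</span>"]
      else acc ++ ["<span class=\"ks-level__star--empty\">&#9733;</span>"]) []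
  let stars_html := PySem.Str.join "" stars
  let name := levelNamesA.getD lvl ""
  "\n<div class=\"ks-level-badge\" markdown=\"0\"><span class=\"ks-level\">" ++ stars_html
    ++ "</span> " ++ name ++ "</div>\n"

-- ===== PORT B =====
def levelNamesB : PySem.Dict Int String :=
  PySem.Dict.ofList [(1, "Intro"), (2, "Basic"), (3, "Intermediate"), (4, "Advanced"), (5, "Expert")]

def filledB : String := "<span class=\"ks-level__star--filled\">&#9733;</span>"
def emptyB : String := "<span class=\"ks-level__star--empty\">&#9733;</span>"

-- STRIP = [FILLED]*5 + [EMPTY]*5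
def stripB : List String :=
  List.replicate 5 filledB ++ List.replicate 5 emptyB

def make_badge_py_alt (level : Int) : String :=
  let lvl := max 1 (min 5 level)
  let stars_html := PySem.Str.join "" (PySem.List.slice stripB (some (5 - lvl)) (some (10 - lvl)))
  -- LEVEL_NAMES[lvl]: the clamp guarantees the key exists, so .getD "" is never the default
  let name := levelNamesB.getD lvl ""
  "\n<div class=\"ks-level-badge\" markdown=\"0\"><span class=\"ks-level\">" ++ stars_html
    ++ "</span> " ++ name ++ "</div>\n"

-- ===== PRECONDITION & SPEC =====
def Spec_make_badge_py (level : Int) (out : String) : Prop := out = make_badge_py_alt level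
instance (level : Int) (out : String) : Decidable (Spec_make_badge_py level out) := by unfold Spec_make_badge_py; infer_instance

-- ===== CLAIM =====
def Claim_equal_make_badge_py : Prop := ∀ (level : Int), Dom_make_badge_py level → Spec_make_badge_py level (make_badge_py level)

-- ===== LEMMAS AND PROOFS =====

-- both ports depend on level only through the clamp max 1 (min 5 level)
theorem clamp_cases (level : Int) :
    max 1 (min 5 level) = 1 ∨ max 1 (min 5 level) = 2 ∨ max 1 (min 5 level) = 3 ∨
    max 1 (min 5 level) = 4 ∨ max 1 (min 5 level) = 5 := by omega

-- ===== VERDICT =====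
set_option maxRecDepth 20000 in
theorem make_badge_py_spec : Claim_equal_make_badge_py := by
  intro level _
  show make_badge_py level = make_badge_py_alt level
  unfold make_badge_py make_badge_py_alt
  rcases clamp_cases level with h | h | h | h | h <;> rw [h] <;> decide
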